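-- pv_equiv track=rewrite | github.com/starlinetor/University_Python | Labs/Lab6/06.2.2.py | valid_repetition_roman
-- ===== SOURCE A (Python) =====
-- def valid_repetition_roman(number : str) -> bool:
--     """
--     Returns true if the roman number has a valid repetition\n
--     A valid repetition are those where no more than 3 charcter are repeated
--     """
--     seen_number : str = ""
--     counter : int = 0
--     for char in number:
--         if char == seen_number:
--             counter += 1
--         else :
--             seen_number = char
--             counter = 1
--         if counter == 4:
--             return False
--     return True
-- ===== SOURCE B (Python) =====
-- def valid_repetition_roman(number: str) -> bool:
--     """
--     Returns true if the roman number has a valid repetition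
--     A valid repetition are those where no more than 3 character are repeated
--     """
--     return not any(a == b == c == d
--                    for a, b, c, d in zip(number, number[1:], number[2:], number[3:]))
-- ===== Notes on version B (the rewrite author's own statement) =====
-- stated objective: idiomatic
-- what changed: Replaced the stateful seen-char/counter loop with an early return by a stateless sliding-window check: any window of four consecutive equal characters (zip of the string with its three shifts) invalidates the numeral.
import Mathlib
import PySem

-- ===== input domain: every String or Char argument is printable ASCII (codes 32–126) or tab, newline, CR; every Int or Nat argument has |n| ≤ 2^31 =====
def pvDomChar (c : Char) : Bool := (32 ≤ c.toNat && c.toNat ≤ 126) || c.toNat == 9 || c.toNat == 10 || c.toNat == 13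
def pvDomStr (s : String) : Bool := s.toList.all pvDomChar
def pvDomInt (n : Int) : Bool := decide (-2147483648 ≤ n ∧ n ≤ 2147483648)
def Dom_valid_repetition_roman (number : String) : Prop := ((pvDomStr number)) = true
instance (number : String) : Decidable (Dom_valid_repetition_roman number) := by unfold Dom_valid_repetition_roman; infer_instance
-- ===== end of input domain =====

-- B replaces A's stateful counter loop with a stateless sliding-window check (idiomatic; same cost).

-- ===== PORT A =====
-- A's loop state: seen_number (always "" or a single char, modelled Option Char: "" ↦ none) and counter : int.
-- 'char == seen_number' is exactly 'some c = seen' under this modelling ("" never equals a 1-char string).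
def validRepLoopA : List Char → Option Char → Int → Bool
  | [], _, _ => true
  | c :: rest, seen, counter =>
    let st := if some c = seen then (seen, counter + 1) else (some c, (1 : Int))
    if st.2 = 4 then false else validRepLoopA rest st.1 st.2

def valid_repetition_roman (number : String) : Bool :=
  validRepLoopA number.toList none 0

-- ===== PORT B =====
-- zip(number, number[1:], number[2:], number[3:]) enumerates exactly the length-4 windows;
-- the pattern-match recursion below walks those windows directly (exact for the zip of the three shifts).
def anyRun4 : List Char → Bool
  | a :: b :: c :: d :: rest => (a == b && b == c && c == d) || anyRun4 (b :: c :: d :: rest)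
  | _ => false

def valid_repetition_roman_alt (number : String) : Bool :=
  !anyRun4 number.toList

-- ===== PRECONDITION & SPEC =====
def Spec_valid_repetition_roman (number : String) (out : Bool) : Prop := out = valid_repetition_roman_alt number
instance (number : String) (out : Bool) : Decidable (Spec_valid_repetition_roman number out) := by unfold Spec_valid_repetition_roman; infer_instance

-- ===== CLAIM (what is proved, stated in full; the proofs are below) =====
def Claim_equal_valid_repetition_roman : Prop := ∀ (number : String), Dom_valid_repetition_roman number → Spec_valid_repetition_roman number (valid_repetition_roman number)

-- ===== LEMMAS AND PROOFS =====

/-- l starts with at least n copies of s. -/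
def prefEq (s : Char) : Nat → List Char → Bool
  | 0, _ => true
  | _ + 1, [] => false
  | n + 1, c :: l => (c == s) && prefEq s n l

lemma anyRun4_cons (a : Char) (l : List Char) :
    anyRun4 (a :: l) = (prefEq a 3 l || anyRun4 l) := by
  rcases l with _ | ⟨b, _ | ⟨c, _ | ⟨d, t⟩⟩⟩
  · simp [anyRun4, prefEq]
  · simp [anyRun4, prefEq]
  · simp [anyRun4, prefEq]
  · simp only [anyRun4, prefEq, Bool.and_true]
    congr 1
    rw [Bool.eq_iff_iff]
    simp only [Bool.and_eq_true, beq_iff_eq]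
    constructor
    · rintro ⟨⟨rfl, rfl⟩, rfl⟩; exact ⟨rfl, rfl, rfl⟩
    · rintro ⟨rfl, rfl, rfl⟩; exact ⟨⟨rfl, rfl⟩, rfl⟩

lemma prefEq_succ (s : Char) : ∀ (n : Nat) (l : List Char),
    prefEq s (n + 1) l = true → prefEq s n l = true := by
  intro n
  induction n with
  | zero => intro l _; simp [prefEq]
  | succ m ih =>
    intro l h
    cases l with
    | nil => simp [prefEq] at h
    | cons c t =>
      simp [prefEq] at h ⊢
      exact ⟨h.1, ih t h.2⟩

lemma validRepLoopA_char (l : List Char) : ∀ (s : Char) (n : Nat), 1 ≤ n → n ≤ 3 →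
    validRepLoopA l (some s) (4 - (n : Int)) = !(prefEq s n l || anyRun4 l) := by
  induction l with
  | nil =>
    intro s n h1 _
    cases n with
    | zero => omega
    | succ m => simp [validRepLoopA, prefEq, anyRun4]
  | cons c rest ih =>
    intro s n h1 h3
    by_cases hc : c = s
    · subst hc
      by_cases hn : n = 1
      · subst hn
        simp [validRepLoopA, prefEq]
      · -- n = 2 or 3; counter becomes 4-(n-1), ≠ 4
        have hne : ¬ (4 - (n : Int) + 1 = 4) := by omega
        have step : validRepLoopA (c :: rest) (some c) (4 - (n : Int))
            = validRepLoopA rest (some c) (4 - ((n - 1 : Nat) : Int)) := by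
          have hcast : (4 - (n : Int) + 1) = 4 - ((n - 1 : Nat) : Int) := by
            omega
          have hne' : (4 - ((n - 1 : Nat) : Int)) ≠ 4 := by omega
          simp only [validRepLoopA]
          simp [hcast, hne']
        rw [step, ih c (n - 1) (by omega) (by omega), anyRun4_cons]
        have hpr : prefEq c n (c :: rest) = prefEq c (n - 1) rest := by
          cases n with
          | zero => omega
          | succ m => simp [prefEq]
        rw [hpr]
        -- prefEq c 3 rest implies prefEq c (n-1) rest since n-1 ≤ 2
        have himp : prefEq c 3 rest = true → prefEq c (n - 1) rest = true := by
          intro h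
          have h2 := prefEq_succ c 2 rest h
          have h1' := prefEq_succ c 1 rest h2
          interval_cases n <;> simp_all
        cases hA : prefEq c (n - 1) rest <;> cases hP : prefEq c 3 rest <;>
          cases hR : anyRun4 rest <;> simp_all
    · have hcond : ¬ (some c = some s) := by simp [hc]
      have step : validRepLoopA (c :: rest) (some s) (4 - (n : Int))
          = validRepLoopA rest (some c) (4 - ((3 : Nat) : Int)) := by
        simp [validRepLoopA, hcond]
      rw [step, ih c 3 (by omega) (by omega), anyRun4_cons]
      have hpr : prefEq s n (c :: rest) = false := by
        cases n with
        | zero => omega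
        | succ m => simp [prefEq, hc]
      rw [hpr]
      simp

lemma validRepLoopA_eq (number : String) :
    validRepLoopA number.toList none 0 = !anyRun4 number.toList := by
  cases h : number.toList with
  | nil => simp [validRepLoopA, anyRun4]
  | cons c rest =>
    have hcond : ¬ (some c = (none : Option Char)) := by simp
    have step : validRepLoopA (c :: rest) none 0
        = validRepLoopA rest (some c) (4 - ((3 : Nat) : Int)) := by
      simp [validRepLoopA, hcond]
    rw [step, validRepLoopA_char rest c 3 (by omega) (by omega), anyRun4_cons]

-- ===== VERDICT (by name: the statement is the Claim_ definition above) =====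
theorem valid_repetition_roman_spec : Claim_equal_valid_repetition_roman := by
  intro number _
  unfold Spec_valid_repetition_roman valid_repetition_roman valid_repetition_roman_alt
  exact validRepLoopA_eq number
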